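-- pv_equiv track=rewrite | github.com/pypi-data/pypi-mirror-403 | packages/contextfs/contextfs-0.2.34.tar.gz/contextfs-0.2.34/src/contextfs/filetypes/handlers/rust.py | _find_doc_comment
-- ===== SOURCE A (Python) =====
-- def _find_doc_comment(content: str, pos: int) -> str | None:
--     """Find doc comment preceding a position."""
--     search_start = max(0, pos - 500)
--     segment = content[search_start:pos]
--
--     doc_lines = []
--     for line in reversed(segment.rstrip().split("\n")):
--         line = line.strip()
--         if line.startswith("///"):
--             doc_lines.insert(0, line[3:].strip())
--         elif line.startswith("#[") or not line:
--             continue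
--         else:
--             break
--
--     return "\n".join(doc_lines) if doc_lines else None
-- ===== SOURCE B (Python) =====
-- def _find_doc_comment(content: str, pos: int) -> str | None:
--     """Find doc comment preceding a position (two forward passes)."""
--     search_start = max(0, pos - 500)
--     lines = content[search_start:pos].rstrip().split("\n")
--     # pass 1: index of the last "code" line (non-blank, not ///, not #[)
--     boundary = -1
--     for i, raw in enumerate(lines):
--         s = raw.strip()
--         if s and not s.startswith("///") and not s.startswith("#["):
--             boundary = i
--     # pass 2: collect /// lines after the boundary, forward order
--     docs = []
--     for raw in lines[boundary + 1:]:
--         s = raw.strip()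
--         if s.startswith("///"):
--             docs.append(s[3:].strip())
--     return "\n".join(docs) if docs else None
-- ===== Notes on version B (the rewrite author's own statement) =====
-- stated objective: simpler
-- what changed: A scans the lines in reverse with a break and repeatedly inserts at index 0; B makes two forward passes: find the index of the last preceding-code line, then append the '///' payloads after it in order.
import Mathlib
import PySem

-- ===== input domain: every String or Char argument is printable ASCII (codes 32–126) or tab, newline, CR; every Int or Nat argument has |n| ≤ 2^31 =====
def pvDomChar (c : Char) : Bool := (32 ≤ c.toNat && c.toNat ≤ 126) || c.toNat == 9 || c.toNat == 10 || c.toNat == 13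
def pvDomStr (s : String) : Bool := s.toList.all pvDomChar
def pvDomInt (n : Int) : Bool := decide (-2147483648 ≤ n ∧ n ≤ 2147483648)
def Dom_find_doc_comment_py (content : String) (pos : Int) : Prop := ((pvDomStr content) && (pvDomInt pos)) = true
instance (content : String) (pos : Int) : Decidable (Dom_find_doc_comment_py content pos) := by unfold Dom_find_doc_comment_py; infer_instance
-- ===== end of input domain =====

-- B replaces A's backward loop-with-break (and repeated insert(0)) by two forward passes:
-- find the last preceding-code line, then append the '///' payloads after it in order (objective: simpler).

-- ===== PORT A =====
-- the 'for line in reversed(...)' loop: acc is doc_lines, insert(0) prepends; returning acc = break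
def pvDocLoopA : List (List Char) → List (List Char) → List (List Char)
  | [], acc => acc
  | l :: rest, acc =>
    let line := PySem.Chars.strip l
    if PySem.Chars.startswith line "///".toList then
      pvDocLoopA rest (PySem.Chars.strip (line.drop 3) :: acc)
    else if PySem.Chars.startswith line "#[".toList || line.isEmpty then
      pvDocLoopA rest acc
    else acc

def find_doc_comment_py (content : String) (pos : Int) : Option String :=
  let searchStart : Int := max 0 (pos - 500)
  let segment := PySem.List.slice content.toList (some searchStart) (some pos)
  let docLines := pvDocLoopA (PySem.Chars.splitOn (PySem.Chars.rstrip segment) "\n".toList).reverse []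
  if docLines.isEmpty then none
  else some (String.ofList (PySem.Chars.join "\n".toList docLines))

-- ===== PORT B =====
-- a "code" line: stripped form non-empty, not '///…', not '#[…'
def pvIsCodeB (l : List Char) : Bool :=
  let s := PySem.Chars.strip l
  !s.isEmpty && !PySem.Chars.startswith s "///".toList && !PySem.Chars.startswith s "#[".toList

-- pass 1 of B: index of the last code line, -1 if there is none
def pvBnd (ls : List (List Char)) : Int :=
  (PySem.List.enumerate ls).foldl (fun b p => if pvIsCodeB p.2 then p.1 else b) (-1)

def find_doc_comment_py_alt (content : String) (pos : Int) : Option String :=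
  let searchStart : Int := max 0 (pos - 500)
  let lines := PySem.Chars.splitOn
    (PySem.Chars.rstrip (PySem.List.slice content.toList (some searchStart) (some pos))) "\n".toList
  let boundary := pvBnd lines
  -- pass 2: collect '///' payloads after the boundary, forward order
  let docs := (PySem.List.slice lines (some (boundary + 1))).foldl (fun acc raw =>
      let s := PySem.Chars.strip raw
      if PySem.Chars.startswith s "///".toList then acc ++ [PySem.Chars.strip (s.drop 3)] else acc) []
  if docs.isEmpty then none
  else some (String.ofList (PySem.Chars.join "\n".toList docs))

-- ===== PRECONDITION & SPEC =====
def Spec_find_doc_comment_py (content : String) (pos : Int) (out : Option String) : Prop := out = find_doc_comment_py_alt content pos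
instance (content : String) (pos : Int) (out : Option String) : Decidable (Spec_find_doc_comment_py content pos out) := by unfold Spec_find_doc_comment_py; infer_instance

-- ===== CLAIM (what is proved, stated in full; the proofs are below) =====
def Claim_equal_find_doc_comment_py : Prop := ∀ (content : String) (pos : Int), Dom_find_doc_comment_py content pos → Spec_find_doc_comment_py content pos (find_doc_comment_py content pos)

-- ===== LEMMAS AND PROOFS =====

-- abbreviations for the per-line tests, used only by the proofs
def pvIsDoc (l : List Char) : Bool := PySem.Chars.startswith (PySem.Chars.strip l) "///".toList
def pvDocOf (l : List Char) : List Char := PySem.Chars.strip ((PySem.Chars.strip l).drop 3)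

lemma pvIsCodeB_false_of_doc {l : List Char} (h : pvIsDoc l = true) : pvIsCodeB l = false := by
  have h' : PySem.Chars.startswith (PySem.Chars.strip l) ['/', '/', '/'] = true := h
  unfold pvIsCodeB; simp [h']

lemma pvDocLoopA_cons (l : List Char) (rest : List (List Char)) (acc : List (List Char)) :
    pvDocLoopA (l :: rest) acc =
      if pvIsDoc l then pvDocLoopA rest (pvDocOf l :: acc)
      else if pvIsCodeB l then acc else pvDocLoopA rest acc := by
  simp only [pvDocLoopA, pvIsDoc, pvDocOf, pvIsCodeB]
  by_cases hd : PySem.Chars.startswith (PySem.Chars.strip l) ['/', '/', '/'] = true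
  · simp [hd]
  · by_cases hh : PySem.Chars.startswith (PySem.Chars.strip l) ['#', '['] = true
    · simp [hd, hh]
    · by_cases he : (PySem.Chars.strip l).isEmpty = true <;> simp [hd, hh, he]

-- A's reverse loop collects, front-to-back, the '///' payloads of the code-free prefix of its input
lemma pvDocLoopA_eq (rs : List (List Char)) (acc : List (List Char)) :
    pvDocLoopA rs acc =
      (((rs.takeWhile (fun l => !pvIsCodeB l)).filter pvIsDoc).map pvDocOf).reverse ++ acc := by
  induction rs generalizing acc with
  | nil => simp [pvDocLoopA]
  | cons l rest ih =>
    rw [pvDocLoopA_cons, List.takeWhile_cons]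
    by_cases hd : pvIsDoc l = true
    · have hnc := pvIsCodeB_false_of_doc hd
      simp [hd, hnc, ih]
    · by_cases hc : pvIsCodeB l = true
      · simp [hd, hc]
      · simp only [Bool.not_eq_true] at hc
        simp [hd, hc, ih]

lemma pvBnd_append (init : List (List Char)) (x : List Char) :
    pvBnd (init ++ [x]) = if pvIsCodeB x then (init.length : Int) else pvBnd init := by
  simp [pvBnd, PySem.List.enumerate_append, PySem.List.enumerate]

-- B's boundary pass: dropping past the last code line leaves exactly the longest code-free suffix
lemma pvBnd_drop (ls : List (List Char)) :
    pvBnd ls < ls.length ∧ -1 ≤ pvBnd ls ∧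
      ls.drop (pvBnd ls + 1).toNat = (ls.reverse.takeWhile (fun l => !pvIsCodeB l)).reverse := by
  induction ls using List.reverseRecOn with
  | nil => simp [pvBnd, PySem.List.enumerate]
  | append_singleton init x ih =>
    obtain ⟨hlt, hge, hdrop⟩ := ih
    rw [pvBnd_append]
    by_cases hx : pvIsCodeB x = true
    · refine ⟨by simp [hx], by simp [hx], ?_⟩
      rw [if_pos hx]
      have ht : ((init.length : Int) + 1).toNat = init.length + 1 := by omega
      rw [ht, List.drop_eq_nil_of_le (by simp)]
      simp [hx]
    · refine ⟨by rw [if_neg hx]; simp only [List.length_append, List.length_cons, List.length_nil]; push_cast; omega, by rw [if_neg hx]; omega, ?_⟩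
      rw [if_neg hx]
      have hle : (pvBnd init + 1).toNat ≤ init.length := by omega
      rw [List.drop_append_of_le_length hle, hdrop]
      simp [hx]

-- ===== VERDICT (by name: the statement is the Claim_ definition above) =====
theorem find_doc_comment_py_spec : Claim_equal_find_doc_comment_py := by
  intro content pos _
  unfold Spec_find_doc_comment_py find_doc_comment_py find_doc_comment_py_alt
  simp only []
  set ls := PySem.Chars.splitOn
    (PySem.Chars.rstrip (PySem.List.slice content.toList (some (max 0 (pos - 500))) (some pos)))
    "\n".toList with hls
  obtain ⟨-, hge, hdrop⟩ := pvBnd_drop ls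
  rw [PySem.List.slice_from ls (show (0:Int) ≤ pvBnd ls + 1 by omega), hdrop, pvDocLoopA_eq]
  rw [PySem.List.foldl_append_if
    (p := fun raw => PySem.Chars.startswith (PySem.Chars.strip raw) "///".toList)
    (f := fun raw => PySem.Chars.strip (List.drop 3 (PySem.Chars.strip raw)))]
  simp [pvIsDoc, List.filter_reverse, List.map_reverse]
  unfold pvIsDoc pvDocOf
  rfl
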